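-- pv_equiv track=rewrite | github.com/wblumberg/DataStore | processing/grib2_to_zarr.py | _infer_chunks
-- ===== SOURCE A (Python) =====
-- def _infer_chunks(shape: tuple[int, ...], chunk_y: int, chunk_x: int) -> tuple[int, ...]:
--     if len(shape) == 1:
--         return (max(1, min(shape[0], chunk_x)),)
--
--     if len(shape) == 2:
--         return (
--             max(1, min(shape[0], chunk_y)),
--             max(1, min(shape[1], chunk_x)),
--         )
--
--     leading = [1 for _ in shape[:-2]]
--     trailing = [
--         max(1, min(shape[-2], chunk_y)),
--         max(1, min(shape[-1], chunk_x)),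
--     ]
--     return tuple(leading + trailing)
-- ===== SOURCE B (Python) =====
-- def _infer_chunks(shape: tuple[int, ...], chunk_y: int, chunk_x: int) -> tuple[int, ...]:
--     n = len(shape)
--     out = []
--     for i, dim in enumerate(shape):
--         param = chunk_x if i == n - 1 else chunk_y if i == n - 2 else 1
--         out.append(max(1, min(dim, param)))
--     return tuple(out)
-- ===== Notes on version B (the rewrite author's own statement) =====
-- stated objective: simpler
-- what changed: Replaces A's three length-based branches with one uniform pass over enumerate(shape), choosing chunk_x/chunk_y/1 per axis position; the clamped values of all three cases fall out of the single formula; Pre_ excludes only the empty shape, on which A raises IndexError.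
import Mathlib
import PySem

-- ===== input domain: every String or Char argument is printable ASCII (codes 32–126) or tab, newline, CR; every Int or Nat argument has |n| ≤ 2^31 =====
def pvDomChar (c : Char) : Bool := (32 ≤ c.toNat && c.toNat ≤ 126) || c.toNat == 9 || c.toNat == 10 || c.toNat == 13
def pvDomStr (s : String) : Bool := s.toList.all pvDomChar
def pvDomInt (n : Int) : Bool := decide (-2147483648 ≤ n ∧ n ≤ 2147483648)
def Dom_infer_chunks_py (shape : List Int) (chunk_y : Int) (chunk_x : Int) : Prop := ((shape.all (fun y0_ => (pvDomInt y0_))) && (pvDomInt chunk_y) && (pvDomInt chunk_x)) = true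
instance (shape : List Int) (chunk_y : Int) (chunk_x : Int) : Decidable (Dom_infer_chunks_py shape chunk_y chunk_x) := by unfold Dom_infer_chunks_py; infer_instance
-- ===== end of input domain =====

-- B replaces A's three length-based branches with one uniform pass over enumerate(shape) (objective: simpler).

-- ===== PORT A =====
def infer_chunks_py (shape : List Int) (chunk_y : Int) (chunk_x : Int) : List Int :=
  if shape.length = 1 then
    [max 1 (min ((PySem.List.pyGet? shape 0).getD 0) chunk_x)]
  else if shape.length = 2 then
    [max 1 (min ((PySem.List.pyGet? shape 0).getD 0) chunk_y),
     max 1 (min ((PySem.List.pyGet? shape 1).getD 0) chunk_x)]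
  else
    -- Python raises IndexError on the empty shape (shape[-2]); pyGet? is none exactly there,
    -- the input is excluded by Pre_, and getD 0 is never reached inside Pre_.
    let leading := (PySem.List.slice shape none (some (-2))).map (fun _ => (1 : Int))
    let trailing := [max 1 (min ((PySem.List.pyGet? shape (-2)).getD 0) chunk_y),
                     max 1 (min ((PySem.List.pyGet? shape (-1)).getD 0) chunk_x)]
    leading ++ trailing

-- ===== PORT B =====
def infer_chunks_py_alt (shape : List Int) (chunk_y : Int) (chunk_x : Int) : List Int :=
  let n : Int := shape.length
  (PySem.List.enumerate shape).foldl
    (fun out p =>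
      let param := if p.1 = n - 1 then chunk_x else if p.1 = n - 2 then chunk_y else 1
      out ++ [max 1 (min p.2 param)]) []

-- ===== PRECONDITION & SPEC =====
-- Pre_ excludes only the empty shape, on which A raises IndexError via shape[-2].
def Pre_infer_chunks_py (shape : List Int) (chunk_y : Int) (chunk_x : Int) : Prop := shape ≠ []
instance (shape : List Int) (chunk_y : Int) (chunk_x : Int) : Decidable (Pre_infer_chunks_py shape chunk_y chunk_x) := by unfold Pre_infer_chunks_py; infer_instance
def pvWitness_infer_chunks_py : List Int × Int × Int := ([10, 20, 30], 4, 5)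

def Spec_infer_chunks_py (shape : List Int) (chunk_y : Int) (chunk_x : Int) (out : List Int) : Prop := out = infer_chunks_py_alt shape chunk_y chunk_x
instance (shape : List Int) (chunk_y : Int) (chunk_x : Int) (out : List Int) : Decidable (Spec_infer_chunks_py shape chunk_y chunk_x out) := by unfold Spec_infer_chunks_py; infer_instance

-- ===== CLAIM (what is proved, stated in full; the proofs are below) =====
def Claim_equal_infer_chunks_py : Prop := ∀ (shape : List Int) (chunk_y : Int) (chunk_x : Int), Dom_infer_chunks_py shape chunk_y chunk_x → Pre_infer_chunks_py shape chunk_y chunk_x → Spec_infer_chunks_py shape chunk_y chunk_x (infer_chunks_py shape chunk_y chunk_x)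

-- ===== LEMMAS AND PROOFS =====

-- B's loop as a map over enumerate.
theorem alt_eq_map (shape : List Int) (chunk_y chunk_x : Int) :
    infer_chunks_py_alt shape chunk_y chunk_x =
      (PySem.List.enumerate shape).map
        (fun p => max 1 (min p.2 (if p.1 = (shape.length : Int) - 1 then chunk_x
                                  else if p.1 = (shape.length : Int) - 2 then chunk_y else 1))) := by
  unfold infer_chunks_py_alt
  exact PySem.List.foldl_append_singleton_eq_map
    (fun p => max 1 (min p.2 (if p.1 = (shape.length : Int) - 1 then chunk_x
                              else if p.1 = (shape.length : Int) - 2 then chunk_y else 1)))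
    (PySem.List.enumerate shape) []

theorem enum_append (l m : List Int) (s : Int) :
    PySem.List.enumerate (l ++ m) s = PySem.List.enumerate l s ++ PySem.List.enumerate m (s + l.length) := by
  induction l generalizing s with
  | nil => simp [PySem.List.enumerate_nil]
  | cons x xs ih =>
      simp [PySem.List.enumerate_cons, ih (s + 1)]
      ring_nf

-- On the leading axes (index < n - 2) B produces exactly 1.
theorem map_enum_leading (l : List Int) (s n chunk_y chunk_x : Int) (hub : s + l.length ≤ n - 2) :
    (PySem.List.enumerate l s).map
        (fun p => max 1 (min p.2 (if p.1 = n - 1 then chunk_x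
                                  else if p.1 = n - 2 then chunk_y else 1)))
      = l.map (fun _ => (1 : Int)) := by
  induction l generalizing s with
  | nil => simp [PySem.List.enumerate_nil]
  | cons x xs ih =>
      have hlen : ((x :: xs).length : Int) = xs.length + 1 := by simp
      rw [PySem.List.enumerate_cons]
      simp only [List.map_cons]
      have h1 : s ≠ n - 1 := by simp at hub; omega
      have h2 : s ≠ n - 2 := by simp at hub; omega
      rw [if_neg h1, if_neg h2, ih (s + 1) (by simp at hub ⊢; omega)]
      have : max 1 (min x 1) = 1 := by omega
      rw [this]

-- B on shape = l ++ [a, b].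
theorem alt_append_two (l : List Int) (a b chunk_y chunk_x : Int) :
    infer_chunks_py_alt (l ++ [a, b]) chunk_y chunk_x =
      l.map (fun _ => (1 : Int)) ++ [max 1 (min a chunk_y), max 1 (min b chunk_x)] := by
  rw [alt_eq_map, enum_append]
  have hn : ((l ++ [a, b]).length : Int) = l.length + 2 := by simp
  rw [List.map_append, map_enum_leading l 0 _ chunk_y chunk_x (by omega)]
  congr 1
  simp only [PySem.List.enumerate_cons, PySem.List.enumerate_nil, List.map_cons, List.map_nil, hn]
  rw [if_neg (by omega), if_pos (by omega), if_pos (by omega)]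

theorem exists_two_tail (shape : List Int) (h : 2 ≤ shape.length) :
    ∃ l a b, shape = l ++ [a, b] := by
  rcases hr : shape.reverse with _ | ⟨b, t1⟩
  · rw [List.reverse_eq_nil_iff.mp hr] at h; simp at h
  · rcases t1 with _ | ⟨a, t⟩
    · have : shape.length = 1 := by
        rw [← List.length_reverse, hr]; simp
      omega
    · exact ⟨t.reverse, a, b, by rw [← shape.reverse_reverse, hr]; simp⟩

-- ===== VERDICT (by name: the statement is the Claim_ definition above) =====
theorem infer_chunks_py_spec : Claim_equal_infer_chunks_py := by
  intro shape chunk_y chunk_x _ hpre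
  unfold Pre_infer_chunks_py at hpre
  unfold Spec_infer_chunks_py
  rcases hlen1 : shape with _ | ⟨x, rest⟩
  · exact absurd hlen1 hpre
  rcases rest with _ | ⟨y, rest2⟩
  · -- length 1
    simp [infer_chunks_py, infer_chunks_py_alt, PySem.List.enumerate_cons,
          PySem.List.enumerate_nil, PySem.List.pyGet?, PySem.List.pyIdx?]
  · -- length ≥ 2
    obtain ⟨l, a, b, hsh⟩ := exists_two_tail (x :: y :: rest2) (by simp)
    rw [hsh, alt_append_two]
    unfold infer_chunks_py
    have hlen : (l ++ [a, b]).length = l.length + 2 := by simp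
    rw [if_neg (by omega)]
    by_cases hl : l = []
    · subst hl
      rw [if_pos (by simp)]
      simp [PySem.List.pyGet?, PySem.List.pyIdx?]
    · rw [if_neg (by rw [hlen]; intro h; exact hl (List.length_eq_zero_iff.mp (by omega)))]
      have hslice : PySem.List.slice (l ++ [a, b]) none (some (-2)) = l := by
        rw [PySem.List.slice_to_neg_ofNat _ 2 (by omega), hlen]
        simp
      have hg2 : PySem.List.pyGet? (l ++ [a, b]) (-2) = some a := by
        have h2 : (2 : Nat) ≤ (l ++ [a, b]).length := by simp
        rw [show ((-2 : Int)) = -(((2 : Nat) : Int)) from rfl,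
            PySem.List.pyGet?_neg_natCast _ 2 (by omega) h2, hlen]
        simp
      have hg1 : PySem.List.pyGet? (l ++ [a, b]) (-1) = some b := by
        rw [PySem.List.pyGet?_neg_one]
        rw [show l ++ [a, b] = (l ++ [a]) ++ [b] by simp]
        simp
      rw [hslice, hg2, hg1]
      rfl
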